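-- pv_equiv track=rewrite | github.com/JonaBenja/appliedtm | code/utils.py | previous_and_next_token_extraction
-- ===== SOURCE A (Python) =====
-- def previous_and_next_token_extraction(tokens):
--     """
--     Function to extract previous and preceding token from tokens list.
--     """
--     position_index = 0
--
--     prev_tokens = []
--     next_tokens = []
--
--     for i in range(len(tokens)):
--
--         prev_index = (position_index - 1)
--         next_index = (position_index + 1)
--
--         #previous token
--         if prev_index < 0:
--             previous_token = "None"
--         else:
--             previous_token = tokens[prev_index]
--
--         prev_tokens.append(previous_token)
--
--         #next token
--         if next_index < len(tokens):
--             next_token = tokens[next_index]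
--         else:
--             next_token = "None"
--
--         next_tokens.append(next_token)
--
--         #moving to next token in list
--         position_index += 1
--
--     return prev_tokens, next_tokens
-- ===== SOURCE B (Python) =====
-- def previous_and_next_token_extraction(tokens):
--     """Build the two lists directly by slicing: previous = 'None' + all but last,
--     next = all but first + 'None'."""
--     if not tokens:
--         return [], []
--     prev_tokens = ["None"] + list(tokens[:-1])
--     next_tokens = list(tokens[1:]) + ["None"]
--     return prev_tokens, next_tokens
-- ===== Notes on version B (the rewrite author's own statement) =====
-- stated objective: simpler
-- what changed: Replaces the index loop with per-element boundary branches and appends by two whole-list slices: prev = ['None'] + tokens[:-1], next = tokens[1:] + ['None'], with an explicit empty-input case.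
import Mathlib
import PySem

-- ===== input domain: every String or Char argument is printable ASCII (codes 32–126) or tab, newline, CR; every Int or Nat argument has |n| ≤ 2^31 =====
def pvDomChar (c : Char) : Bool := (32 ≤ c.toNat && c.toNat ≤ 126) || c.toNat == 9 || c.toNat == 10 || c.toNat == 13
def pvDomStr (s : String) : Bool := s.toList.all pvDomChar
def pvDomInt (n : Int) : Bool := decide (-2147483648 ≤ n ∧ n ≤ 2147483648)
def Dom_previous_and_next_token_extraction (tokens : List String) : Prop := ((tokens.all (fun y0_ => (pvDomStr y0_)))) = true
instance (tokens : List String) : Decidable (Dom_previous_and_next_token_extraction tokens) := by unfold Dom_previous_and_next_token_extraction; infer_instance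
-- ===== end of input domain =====

-- B replaces A's index loop by two whole-list slices ('None' + all-but-last, all-but-first + 'None'); objective: simpler.

-- ===== PORT A =====
-- loop 'for i in range(len(tokens))' with position_index = i, appending to two accumulator lists
def previous_and_next_token_extraction (tokens : List String) : List String × List String :=
  (List.range tokens.length).foldl
    (fun (st : List String × List String) (i : Nat) =>
      let prev_index : Int := (i : Int) - 1
      let next_index : Int := (i : Int) + 1
      let previous_token :=
        if prev_index < 0 then "None"
        else PySem.List.pyGetD tokens prev_index ""   -- in range: 0 ≤ prev_index < len
      let next_token :=
        if next_index < (tokens.length : Int) then PySem.List.pyGetD tokens next_index ""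
        else "None"
      (st.1 ++ [previous_token], st.2 ++ [next_token]))
    ([], [])

-- ===== PORT B =====
def previous_and_next_token_extraction_alt (tokens : List String) : List String × List String :=
  match tokens with
  | [] => ([], [])
  | _ :: rest => ("None" :: tokens.dropLast, rest ++ ["None"])

-- ===== PRECONDITION & SPEC =====
def Spec_previous_and_next_token_extraction (tokens : List String) (out : List String × List String) : Prop := out = previous_and_next_token_extraction_alt tokens
instance (tokens : List String) (out : List String × List String) : Decidable (Spec_previous_and_next_token_extraction tokens out) := by unfold Spec_previous_and_next_token_extraction; infer_instance

-- ===== CLAIM (what is proved, stated in full; the proofs are below) =====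
def Claim_equal_previous_and_next_token_extraction : Prop := ∀ (tokens : List String), Dom_previous_and_next_token_extraction tokens → Spec_previous_and_next_token_extraction tokens (previous_and_next_token_extraction tokens)

-- ===== LEMMAS AND PROOFS =====

-- the two step functions of A's loop, as pure functions of the index
def pvPrevAt (tokens : List String) (i : Nat) : String :=
  if (i : Int) - 1 < 0 then "None" else PySem.List.pyGetD tokens ((i : Int) - 1) ""

def pvNextAt (tokens : List String) (i : Nat) : String :=
  if (i : Int) + 1 < (tokens.length : Int) then PySem.List.pyGetD tokens ((i : Int) + 1) "" else "None"

-- A's fold splits into two maps over the index range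
theorem pv_fold_eq_maps (tokens : List String) (n : Nat) :
    (List.range n).foldl
      (fun (st : List String × List String) i =>
        (st.1 ++ [pvPrevAt tokens i], st.2 ++ [pvNextAt tokens i])) ([], [])
    = ((List.range n).map (pvPrevAt tokens), (List.range n).map (pvNextAt tokens)) := by
  induction n with
  | zero => simp
  | succ n ih =>
    rw [List.range_succ, List.foldl_append, ih]
    simp

theorem pv_map_prev (t : String) (rest : List String) :
    (List.range (t :: rest).length).map (pvPrevAt (t :: rest))
      = "None" :: (t :: rest).dropLast := by
  apply List.ext_getElem
  · simp
  · intro i h1 h2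
    simp only [List.getElem_map, List.getElem_range, pvPrevAt]
    have h1' : i < rest.length + 1 := by simpa using h1
    rcases i with _ | j
    · simp
    · rw [if_neg (by push_cast; omega)]
      rw [show ((j + 1 : Nat) : Int) - 1 = ((j : Nat) : Int) by push_cast; ring,
        PySem.List.pyGetD_natCast]
      rw [List.getD_eq_getElem _ _ (by simp; omega)]
      rw [List.getElem_cons_succ]
      rw [List.getElem_dropLast]

theorem pv_map_next (t : String) (rest : List String) :
    (List.range (t :: rest).length).map (pvNextAt (t :: rest))
      = rest ++ ["None"] := by
  apply List.ext_getElem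
  · simp
  · intro i h1 h2
    simp only [List.getElem_map, List.getElem_range, pvNextAt]
    have h1' : i < rest.length + 1 := by simpa using h1
    by_cases hir : i < rest.length
    · rw [if_pos (by simp only [List.length_cons]; push_cast; omega)]
      rw [show ((i : Nat) : Int) + 1 = ((i + 1 : Nat) : Int) by push_cast; ring,
        PySem.List.pyGetD_natCast]
      rw [List.getD_eq_getElem _ _ (by simp; omega)]
      rw [List.getElem_cons_succ]
      rw [List.getElem_append_left hir]
    · have hie : i = rest.length := by omega
      subst hie
      rw [if_neg (by simp only [List.length_cons]; push_cast; omega)]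
      simp

-- ===== VERDICT (by name: the statement is the Claim_ definition above) =====
theorem previous_and_next_token_extraction_spec : Claim_equal_previous_and_next_token_extraction := by
  intro tokens _
  unfold Spec_previous_and_next_token_extraction
  cases tokens with
  | nil => rfl
  | cons t rest =>
    show (List.range (t :: rest).length).foldl
        (fun (st : List String × List String) i =>
          (st.1 ++ [pvPrevAt (t :: rest) i], st.2 ++ [pvNextAt (t :: rest) i])) ([], [])
      = ("None" :: (t :: rest).dropLast, rest ++ ["None"])
    rw [pv_fold_eq_maps, pv_map_prev, pv_map_next]
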